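-- pv_equiv track=rewrite | github.com/twinkle13531/master_degree | Utokyo_lessens_S1S2/笠原先生python/29.py | scan_gene_lengths
-- ===== SOURCE A (Python) =====
-- def scan_gene_lengths(read_lines_list):
-- 	Chromosome_dic = {}
-- 	for line_list in read_lines_list:
-- 		line2 = line_list
--
-- 		# skip the following block if the record attribute is not "gene"
-- 		if line2[2] != 'gene':
-- 			continue
--
-- 		# skip if unmapped
-- 		gene_name = line2[0]
-- 		if gene_name.startswith('211') or gene_name.startswith('Unmapped'):
-- 			continue
--
-- 		# here we have the length; first check if we have already scanned the gene before
-- 		if gene_name not in Chromosome_dic: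
-- 			Chromosome_dic[gene_name] = [0, 0]
--
-- 		# update length and count
-- 		gene_length = int(line2[4]) - int(line2[3]) + 1
-- 		Chromosome_dic[gene_name][1] += gene_length
-- 		Chromosome_dic[gene_name][0] += 1
--
-- 	Chromosome_key_list = sorted(Chromosome_dic.keys())
-- 	return Chromosome_key_list, Chromosome_dic #list
-- ===== SOURCE B (Python) =====
-- def scan_gene_lengths(read_lines_list):
--     # Collect one (gene_name, length) pair per qualifying record, then aggregate per key.
--     pairs = [(l[0], int(l[4]) - int(l[3]) + 1)
--              for l in read_lines_list
--              if l[2] == 'gene' and not (l[0].startswith('211') or l[0].startswith('Unmapped'))]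
--     keys = list(dict.fromkeys(name for name, _ in pairs))
--     dic = {k: [sum(1 for n, _ in pairs if n == k),
--                sum(g for n, g in pairs if n == k)]
--            for k in keys}
--     return sorted(keys), dic
-- ===== Notes on version B (the rewrite author's own statement) =====
-- stated objective: alternative
-- what changed: Replaces the single pass that mutates a dict of [count,total] lists in place with a filter-collect decomposition: build the list of (gene_name, length) pairs once, dedup the names for the key order, and compute each key's count and total by summing over the pair list.
import Mathlib
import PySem

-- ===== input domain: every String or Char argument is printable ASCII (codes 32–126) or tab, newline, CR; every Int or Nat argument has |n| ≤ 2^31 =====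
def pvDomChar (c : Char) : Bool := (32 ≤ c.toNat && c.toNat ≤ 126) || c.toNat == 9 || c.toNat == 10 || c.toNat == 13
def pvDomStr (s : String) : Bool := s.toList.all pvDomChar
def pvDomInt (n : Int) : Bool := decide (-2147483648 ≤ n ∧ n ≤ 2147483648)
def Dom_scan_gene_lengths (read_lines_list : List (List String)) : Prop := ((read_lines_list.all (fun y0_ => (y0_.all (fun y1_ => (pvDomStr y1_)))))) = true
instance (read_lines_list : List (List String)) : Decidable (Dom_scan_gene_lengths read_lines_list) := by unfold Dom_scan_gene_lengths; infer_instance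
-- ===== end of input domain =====

-- B replaces A's single in-place dict-mutating pass by a filter-collect decomposition
-- (collect (name, length) pairs, dedup the names, aggregate per key); same return value, no speed claim.


-- ===== PORT A =====
def scan_gene_lengths (read_lines_list : List (List String)) : List String × (List (String × List Int)) :=
  let Chromosome_dic : PySem.Dict String (List Int) :=
    read_lines_list.foldl (fun d line2 =>
      if PySem.List.pyGetD line2 2 "" ≠ "gene" then d
      else
        let gene_name := PySem.List.pyGetD line2 0 ""
        if PySem.Str.startswith gene_name "211" || PySem.Str.startswith gene_name "Unmapped" then d
        else
          let d := if d.contains gene_name then d else d.insert gene_name [0, 0]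
          let gene_length := (PySem.Int.ofStr? (PySem.List.pyGetD line2 4 "")).getD 0
                           - (PySem.Int.ofStr? (PySem.List.pyGetD line2 3 "")).getD 0 + 1
          let d := d.modify gene_name [] (fun v => PySem.List.pySetD v 1 (PySem.List.pyGetD v 1 0 + gene_length))
          d.modify gene_name [] (fun v => PySem.List.pySetD v 0 (PySem.List.pyGetD v 0 0 + 1)))
      PySem.Dict.empty
  (PySem.List.sorted Chromosome_dic.keys (fun k => k) false, Chromosome_dic.items)

-- ===== PORT B =====
-- the comprehension's per-line filter/value (Source B's pair comprehension)
def pvGenePair (l : List String) : Option (String × Int) :=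
  if PySem.List.pyGetD l 2 "" ≠ "gene" then none
  else if PySem.Str.startswith (PySem.List.pyGetD l 0 "") "211"
          || PySem.Str.startswith (PySem.List.pyGetD l 0 "") "Unmapped" then none
  else some (PySem.List.pyGetD l 0 "",
             (PySem.Int.ofStr? (PySem.List.pyGetD l 4 "")).getD 0
             - (PySem.Int.ofStr? (PySem.List.pyGetD l 3 "")).getD 0 + 1)

def scan_gene_lengths_alt (read_lines_list : List (List String)) : List String × (List (String × List Int)) :=
  let pairs := read_lines_list.filterMap pvGenePair
  let keys := PySem.List.dedup (pairs.map (fun p => p.1))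
  let dic := keys.map (fun k =>
      (k, [((pairs.filter (fun p => p.1 == k)).map (fun _ => (1 : Int))).sum,
           ((pairs.filter (fun p => p.1 == k)).map (fun p => p.2)).sum]))
  (PySem.List.sorted keys (fun k => k) false, dic)

-- ===== PRECONDITION & SPEC =====
-- Pre_ excludes exactly the inputs where the Python raises: a record shorter than 3 fields
-- (IndexError at line[2]), or a qualifying 'gene' record shorter than 5 fields (IndexError)
-- or whose fields 3/4 are not int()-parsable (ValueError).
def Pre_scan_gene_lengths (read_lines_list : List (List String)) : Prop :=
  ∀ line ∈ read_lines_list, 3 ≤ line.length ∧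
    ((PySem.List.pyGetD line 2 "" = "gene"
      ∧ PySem.Str.startswith (PySem.List.pyGetD line 0 "") "211" = false
      ∧ PySem.Str.startswith (PySem.List.pyGetD line 0 "") "Unmapped" = false) →
      5 ≤ line.length
      ∧ (PySem.Int.ofStr? (PySem.List.pyGetD line 3 "")).isSome
      ∧ (PySem.Int.ofStr? (PySem.List.pyGetD line 4 "")).isSome)
instance (read_lines_list : List (List String)) : Decidable (Pre_scan_gene_lengths read_lines_list) := by unfold Pre_scan_gene_lengths; infer_instance

def pvWitness_scan_gene_lengths : List (List String) :=
  [["chr1", "src", "gene", "1", "10"], ["chr1", "src", "exon"], ["chr2", "src", "gene", "2", "5"]]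

def Spec_scan_gene_lengths (read_lines_list : List (List String)) (out : List String × (List (String × List Int))) : Prop := out = scan_gene_lengths_alt read_lines_list
instance (read_lines_list : List (List String)) (out : List String × (List (String × List Int))) : Decidable (Spec_scan_gene_lengths read_lines_list out) := by unfold Spec_scan_gene_lengths; infer_instance

-- ===== CLAIM (what is proved, stated in full; the proofs are below) =====
def Claim_equal_scan_gene_lengths : Prop := ∀ (read_lines_list : List (List String)), Dom_scan_gene_lengths read_lines_list → Pre_scan_gene_lengths read_lines_list → Spec_scan_gene_lengths read_lines_list (scan_gene_lengths read_lines_list)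

-- ===== LEMMAS AND PROOFS =====

-- A's loop body, per (name, length) pair
def pvStepA (d : PySem.Dict String (List Int)) (p : String × Int) : PySem.Dict String (List Int) :=
  let d1 := if d.contains p.1 then d else d.insert p.1 [0, 0]
  let d2 := d1.modify p.1 [] (fun v => PySem.List.pySetD v 1 (PySem.List.pyGetD v 1 0 + p.2))
  d2.modify p.1 [] (fun v => PySem.List.pySetD v 0 (PySem.List.pyGetD v 0 0 + 1))

-- B's aggregate value for key k
def pvAggVal (ps : List (String × Int)) (k : String) : List Int :=
  [((ps.filter (fun p => p.1 == k)).map (fun _ => (1 : Int))).sum,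
   ((ps.filter (fun p => p.1 == k)).map (fun p => p.2)).sum]

-- A's line loop is the pair loop over the filtered pairs
theorem pvFoldLines (lines : List (List String)) (d : PySem.Dict String (List Int)) :
    lines.foldl (fun d line2 =>
      if PySem.List.pyGetD line2 2 "" ≠ "gene" then d
      else
        let gene_name := PySem.List.pyGetD line2 0 ""
        if PySem.Str.startswith gene_name "211" || PySem.Str.startswith gene_name "Unmapped" then d
        else
          let d := if d.contains gene_name then d else d.insert gene_name [0, 0]
          let gene_length := (PySem.Int.ofStr? (PySem.List.pyGetD line2 4 "")).getD 0
                           - (PySem.Int.ofStr? (PySem.List.pyGetD line2 3 "")).getD 0 + 1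
          let d := d.modify gene_name [] (fun v => PySem.List.pySetD v 1 (PySem.List.pyGetD v 1 0 + gene_length))
          d.modify gene_name [] (fun v => PySem.List.pySetD v 0 (PySem.List.pyGetD v 0 0 + 1))) d
    = (lines.filterMap pvGenePair).foldl pvStepA d := by
  induction lines generalizing d with
  | nil => rfl
  | cons line rest ih =>
      simp only [List.foldl_cons, List.filterMap_cons, pvGenePair]
      by_cases h1 : PySem.List.pyGetD line 2 "" ≠ "gene"
      · simp only [if_pos h1]; exact ih d
      · by_cases h2 : (PySem.Str.startswith (PySem.List.pyGetD line 0 "") "211"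
                       || PySem.Str.startswith (PySem.List.pyGetD line 0 "") "Unmapped") = true
        · simp only [if_neg h1, if_pos h2]; exact ih d
        · simp only [if_neg h1, if_neg h2, List.foldl_cons, pvStepA]
          exact ih _

-- the two in-place list updates A performs on a [count, total] pair
theorem pvUpd (c s g : Int) :
    PySem.List.pySetD (PySem.List.pySetD [c, s] 1 (PySem.List.pyGetD [c, s] 1 0 + g)) 0
      (PySem.List.pyGetD (PySem.List.pySetD [c, s] 1 (PySem.List.pyGetD [c, s] 1 0 + g)) 0 0 + 1)
    = [c + 1, s + g] := by
  have h1 : PySem.List.pySetD [c, s] 1 (PySem.List.pyGetD [c, s] 1 0 + g) = [c, s + g] := by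
    simp [pysem]
  rw [h1]
  simp [pysem]

-- one A-update on a dict that is B's aggregation of ps stays B's aggregation of ps ++ [p]
theorem pvStep (ps : List (String × Int)) (p : String × Int) (D : PySem.Dict String (List Int))
    (ih : D.items = (PySem.List.dedup (ps.map (fun p => p.1))).map (fun k => (k, pvAggVal ps k))) :
    (pvStepA D p).items
      = (PySem.List.dedup ((ps ++ [p]).map (fun p => p.1))).map (fun k => (k, pvAggVal (ps ++ [p]) k)) := by
  have hkeysD : D.keys = PySem.List.dedup (ps.map (fun p => p.1)) := by
    show D.items.map (fun q => q.1) = _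
    rw [ih, List.map_map]
    simp [Function.comp_def]
  have hnd : D.keys.Nodup := by
    rw [hkeysD, PySem.List.dedup_eq_ofList]
    exact PySem.Set.nodup_ofList _
  have hgetD : ∀ k ∈ D.keys, D.getD k [] = pvAggVal ps k := by
    intro k hk
    refine PySem.Dict.getD_of_mem_items D ?_ hnd []
    rw [ih]
    exact List.mem_map_of_mem (hkeysD ▸ hk)
  by_cases hmem : p.1 ∈ D.keys
  · -- existing key: the dict's key list is unchanged
    have hc : D.contains p.1 = true := (PySem.Dict.contains_iff_mem_keys D p.1).mpr hmem
    have hk3 : (pvStepA D p).keys = D.keys := by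
      simp only [pvStepA]
      rw [if_pos hc]
      rw [PySem.Dict.keys_modify, PySem.Dict.keys_insert_of_contains _ _
            (by simp [PySem.Dict.contains_modify, hc]),
          PySem.Dict.keys_modify, PySem.Dict.keys_insert_of_contains _ _ hc]
    have hkeyeq : PySem.List.dedup (((ps ++ [p]).map (fun p => p.1))) = D.keys := by
      simp only [List.map_append, List.map_cons, List.map_nil, PySem.List.dedup_eq_ofList,
        PySem.Set.ofList_append_singleton]
      rw [hkeysD, PySem.List.dedup_eq_ofList] at hmem ⊢
      simp [PySem.Set.add, PySem.Set.contains, hmem]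
    have hnd3 : (pvStepA D p).keys.Nodup := hk3 ▸ hnd
    rw [PySem.Dict.items_eq_map_keys _ hnd3 [], hk3, hkeyeq]
    refine List.map_congr_left ?_
    intro k hk
    have hval : (pvStepA D p).getD k [] = pvAggVal (ps ++ [p]) k := by
      simp only [pvStepA]
      rw [if_pos hc]
      by_cases hkn : k = p.1
      · subst hkn
        rw [PySem.Dict.getD_modify, if_pos rfl, PySem.Dict.getD_modify, if_pos rfl,
            hgetD p.1 hk]
        simp only [pvAggVal]
        rw [pvUpd]
        simp [List.filter_append, List.sum_append]
        try ring
      · rw [PySem.Dict.getD_modify, if_neg hkn, PySem.Dict.getD_modify, if_neg hkn,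
            hgetD k hk]
        have hne : (p.1 == k) = false := by simp [Ne.symm hkn]
        simp [pvAggVal, List.filter_append, hne]
    rw [hval]
  · -- fresh key: appended at the end of the dict
    have hc : D.contains p.1 = false := by
      rw [← Bool.not_eq_true, PySem.Dict.contains_iff_mem_keys]; exact hmem
    have hcne : ¬ D.contains p.1 = true := by simp [hc]
    have hkD1 : (D.insert p.1 [0, 0]).keys = D.keys ++ [p.1] :=
      PySem.Dict.keys_insert_of_not_contains D _ hc
    have hk3 : (pvStepA D p).keys = D.keys ++ [p.1] := by
      simp only [pvStepA]
      rw [if_neg hcne]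
      rw [PySem.Dict.keys_modify, PySem.Dict.keys_insert_of_contains _ _
            (by simp [PySem.Dict.contains_modify, PySem.Dict.contains_insert_self]),
          PySem.Dict.keys_modify, PySem.Dict.keys_insert_of_contains _ _
            (PySem.Dict.contains_insert_self D p.1 [0, 0]), hkD1]
    have hkeyeq : PySem.List.dedup (((ps ++ [p]).map (fun p => p.1))) = D.keys ++ [p.1] := by
      simp only [List.map_append, List.map_cons, List.map_nil, PySem.List.dedup_eq_ofList,
        PySem.Set.ofList_append_singleton]
      rw [hkeysD, PySem.List.dedup_eq_ofList] at hmem ⊢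
      simp [PySem.Set.add, PySem.Set.contains, hmem]
    have hnotin : ∀ q ∈ ps, ¬ (q.1 == p.1) = true := by
      intro q hq hbeq
      apply hmem
      rw [hkeysD, PySem.List.mem_dedup]
      exact (beq_iff_eq.mp hbeq) ▸ List.mem_map_of_mem hq
    have hnd3 : ((pvStepA D p).keys).Nodup := by
      rw [hk3]
      refine List.Nodup.append hnd (List.nodup_singleton _) ?_
      intro a ha hb
      simp at hb; subst hb; exact hmem ha
    rw [PySem.Dict.items_eq_map_keys _ hnd3 [], hk3, hkeyeq]
    refine List.map_congr_left ?_
    intro k hk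
    have hval : (pvStepA D p).getD k [] = pvAggVal (ps ++ [p]) k := by
      simp only [pvStepA]
      rw [if_neg hcne]
      by_cases hkn : k = p.1
      · subst hkn
        rw [PySem.Dict.getD_modify, if_pos rfl, PySem.Dict.getD_modify, if_pos rfl,
            PySem.Dict.getD_insert_self]
        rw [pvUpd]
        have hfilt : ps.filter (fun q => q.1 == p.1) = [] :=
          List.filter_eq_nil_iff.mpr (fun q hq => by simpa using hnotin q hq)
        simp [pvAggVal, List.filter_append, hfilt]
      · rw [PySem.Dict.getD_modify, if_neg hkn, PySem.Dict.getD_modify, if_neg hkn,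
            PySem.Dict.getD_insert_of_ne _ _ _ hkn]
        have hkmem : k ∈ D.keys := by
          rcases List.mem_append.mp hk with h | h
          · exact h
          · exact absurd (by simpa using h) hkn
        rw [hgetD k hkmem]
        have hne : (p.1 == k) = false := by simp [Ne.symm hkn]
        simp [pvAggVal, List.filter_append, hne]
    rw [hval]

-- the dict built by A's pair loop, as an items list, is B's aggregation
theorem pvMain (ps : List (String × Int)) :
    (ps.foldl pvStepA PySem.Dict.empty).items
      = (PySem.List.dedup (ps.map (fun p => p.1))).map (fun k => (k, pvAggVal ps k)) := by
  induction ps using List.reverseRecOn with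
  | nil => rfl
  | append_singleton ps p ih =>
      rw [List.foldl_append, List.foldl_cons, List.foldl_nil]
      exact pvStep ps p _ ih

-- ===== VERDICT (by name: the statement is the Claim_ definition above) =====
theorem scan_gene_lengths_spec : Claim_equal_scan_gene_lengths := by
  intro l _ _
  unfold Spec_scan_gene_lengths
  simp only [scan_gene_lengths, scan_gene_lengths_alt]
  rw [pvFoldLines]
  have hitems := pvMain (l.filterMap pvGenePair)
  have hkeys : (List.foldl pvStepA PySem.Dict.empty (l.filterMap pvGenePair)).keys
      = PySem.List.dedup ((l.filterMap pvGenePair).map (fun p => p.1)) := by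
    show (List.foldl pvStepA PySem.Dict.empty (l.filterMap pvGenePair)).items.map (fun q => q.1) = _
    rw [hitems, List.map_map]
    simp [Function.comp_def]
  rw [hkeys, hitems]
  simp [pvAggVal]
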